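-- pv_equiv track=rewrite | github.com/Rahul2325/Battleships | battleship.py | isVertical
-- ===== SOURCE A (Python) =====
-- def isVertical(ship):
--     for i in range(0,2,1):
--         if ship[i][1]!= ship[i+1][1]:
--             return False
--     row=[]
--     for i in range(0,3,1):
--         row.append(ship[i][0])
--
--     row.sort()
--     for i in range(0,2,1):
--         if (row[i]+1!= row[i+1]):
--             return False
--     return True
-- ===== SOURCE B (Python) =====
-- def isVertical(ship):
--     cols = {ship[i][1] for i in range(3)}
--     if len(cols) != 1:
--         return False
--     rows = {ship[i][0] for i in range(3)}
--     m = min(rows)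
--     return rows == {m, m + 1, m + 2}
-- ===== Notes on version B (the rewrite author's own statement) =====
-- stated objective: simpler
-- what changed: Replaces A's pairwise column loop and sort-then-consecutive-scan with set tests: one column-set size check and a set equality rows == {m, m+1, m+2}.
-- outside the precondition, e.g. on isVertical([(0, 0), (1, 1)]): A returns False, B raises IndexError
import Mathlib
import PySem

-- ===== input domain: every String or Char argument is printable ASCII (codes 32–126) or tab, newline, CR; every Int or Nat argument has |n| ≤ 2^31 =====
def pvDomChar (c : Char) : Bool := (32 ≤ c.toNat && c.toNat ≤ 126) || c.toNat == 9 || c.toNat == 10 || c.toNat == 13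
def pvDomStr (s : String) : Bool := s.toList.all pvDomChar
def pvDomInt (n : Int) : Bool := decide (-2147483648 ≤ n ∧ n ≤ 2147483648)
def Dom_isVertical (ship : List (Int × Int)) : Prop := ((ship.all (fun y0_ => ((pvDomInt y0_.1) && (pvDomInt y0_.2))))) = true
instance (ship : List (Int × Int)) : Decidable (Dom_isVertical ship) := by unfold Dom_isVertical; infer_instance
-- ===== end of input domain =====

-- B replaces A's pairwise column loop and sort-then-scan with set tests (set size, set equality): simpler, same behaviour on 3+-cell ships.


-- ===== PORT A =====
-- literal port of A: early-return loops modelled with an Option Bool accumulator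
-- (some r = "returned r", none = loop still running); the IndexError branches are
-- unreachable under Pre_isVertical (ship has at least 3 cells).
def isVertical (ship : List (Int × Int)) : Bool :=
  match (PySem.List.pyRange 0 2 1).foldl (fun st i =>
      match st with
      | some r => some r
      | none =>
        match PySem.List.pyGet? ship i, PySem.List.pyGet? ship (i + 1) with
        | some a, some b => if a.2 ≠ b.2 then some false else none
        | _, _ => some false) none with
  | some r => r
  | none =>
    let row : List Int := (PySem.List.pyRange 0 3 1).foldl
      (fun r i => r ++ [((PySem.List.pyGet? ship i).getD (0, 0)).1]) []
    let row := PySem.List.sorted row (fun x => x) false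
    match (PySem.List.pyRange 0 2 1).foldl (fun st i =>
        match st with
        | some r => some r
        | none =>
          if (PySem.List.pyGet? row i).getD 0 + 1 ≠ (PySem.List.pyGet? row (i + 1)).getD 0
          then some false else none) none with
    | some r => r
    | none => true

-- ===== PORT B =====
def isVertical_alt (ship : List (Int × Int)) : Bool :=
  let cols := PySem.Set.ofList ((PySem.List.pyRange 0 3 1).map
    (fun i => ((PySem.List.pyGet? ship i).getD (0, 0)).2))
  if PySem.Set.len cols ≠ 1 then false
  else
    let rows := PySem.Set.ofList ((PySem.List.pyRange 0 3 1).map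
      (fun i => ((PySem.List.pyGet? ship i).getD (0, 0)).1))
    match PySem.List.min? rows (fun x => x) with
    | some m => PySem.Set.equal rows (PySem.Set.ofList [m, m + 1, m + 2])
    | none => false  -- unreachable: rows is nonempty

-- ===== PRECONDITION & SPEC =====
-- Pre_ excludes ships with fewer than 3 cells: there A raises IndexError (except when a
-- short-circuit column mismatch returns False first), and B raises IndexError.
def Pre_isVertical (ship : List (Int × Int)) : Prop := 3 ≤ ship.length
instance (ship : List (Int × Int)) : Decidable (Pre_isVertical ship) := by unfold Pre_isVertical; infer_instance
def pvWitness_isVertical : (List (Int × Int)) := [(4, 2), (5, 2), (6, 2)]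

def Spec_isVertical (ship : List (Int × Int)) (out : Bool) : Prop := out = isVertical_alt ship
instance (ship : List (Int × Int)) (out : Bool) : Decidable (Spec_isVertical ship out) := by unfold Spec_isVertical; infer_instance

-- ===== CLAIM (what is proved, stated in full; the proofs are below) =====
def Claim_equal_isVertical : Prop := ∀ (ship : List (Int × Int)), Dom_isVertical ship → Pre_isVertical ship → Spec_isVertical ship (isVertical ship)

-- ===== LEMMAS AND PROOFS =====

-- ===== VERDICT (by name: the statement is the Claim_ definition above) =====
set_option maxHeartbeats 2000000 in
theorem isVertical_spec : Claim_equal_isVertical := by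
  intro ship hdom hpre
  unfold Pre_isVertical at hpre
  rcases ship with _ | ⟨⟨x1, y1⟩, _ | ⟨⟨x2, y2⟩, _ | ⟨⟨x3, y3⟩, rest⟩⟩⟩ <;>
    simp only [List.length_nil, List.length_cons] at hpre <;> try omega
  unfold Spec_isVertical isVertical isVertical_alt
  have g0 : PySem.List.pyGet? ((x1,y1)::(x2,y2)::(x3,y3)::rest) 0 = some (x1,y1) := by
    simp [PySem.List.pyGet?, PySem.List.pyIdx?, (by omega : (0:Int) <= (rest.length:Int) + 1 + 1)]
  have g1 : PySem.List.pyGet? ((x1,y1)::(x2,y2)::(x3,y3)::rest) 1 = some (x2,y2) := by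
    simp [PySem.List.pyGet?, PySem.List.pyIdx?, (by omega : (0:Int) <= (rest.length:Int) + 1)]
  have g2 : PySem.List.pyGet? ((x1,y1)::(x2,y2)::(x3,y3)::rest) 2 = some (x3,y3) := by
    simp [PySem.List.pyGet?, PySem.List.pyIdx?, (by omega : (2:Int) <= (rest.length:Int) + 1 + 1)]
  simp only [show PySem.List.pyRange 0 2 1 = [0, 1] from by decide,
             show PySem.List.pyRange 0 3 1 = [0, 1, 2] from by decide, List.foldl, List.map,
             show (0:Int) + 1 = 1 from by norm_num, show (1:Int) + 1 = 2 from by norm_num,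
             g0, g1, g2, Option.getD_some]
  clear g0 g1 g2 hdom hpre
  clear rest
  by_cases e1 : y1 = y2
  case neg =>
    have e1' : ¬y2 = y1 := fun h => e1 h.symm
    simp only [PySem.Set.ofList, PySem.Set.add, PySem.Set.len, PySem.Set.contains, List.foldl]
    simp [e1, e1']
    try (split_ifs <;> simp_all)
  case pos =>
    subst e1
    by_cases e2 : y1 = y3
    case neg =>
      have e2' : ¬y3 = y1 := fun h => e2 h.symm
      simp only [PySem.Set.ofList, PySem.Set.add, PySem.Set.len, PySem.Set.contains, List.foldl]
      simp [e2, e2']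
    case pos =>
      subst e2
      simp [PySem.Set.ofList, PySem.Set.add, PySem.Set.len, PySem.Set.equal, PySem.List.min?,
            PySem.List.sorted, PySem.List.insertBy, PySem.Set.issubset, PySem.Set.contains]
      split_ifs <;>
        simp_all [PySem.List.insertBy, PySem.List.pyGet?, PySem.List.pyIdx?] <;>
        (repeat' (first
          | omega
          | (rw [Bool.eq_iff_iff]; simp only [Bool.and_eq_true, Bool.or_eq_true, decide_eq_true_eq]; omega)
          | (split_ifs at * <;> simp_all [PySem.List.pyGet?, PySem.List.pyIdx?])))
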